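-- pv_equiv track=rewrite | github.com/Aghuz2021/PruebaCodigo_SeminarioPython_fts16 | PruebaCodigoUO1E/5/5.py | extrae
-- ===== SOURCE A (Python) =====
-- def extrae (txt,pos,sep):
--    cont=0
--    i=1
--    res=""
--    while i<len(txt) and cont!=pos:
--       if txt[i]==sep:
--             cont+=1
--       i+=1
--    while i<len(txt) and txt[i] != sep:
--       res+= txt[i]
--       i+=1
--    return res
-- ===== SOURCE B (Python) =====
-- def extrae(txt, pos, sep):
--     fields = []
--     buf = ""
--     for c in txt[1:]:
--         if c == sep:
--             fields.append(buf)
--             buf = ""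
--         else:
--             buf += c
--     fields.append(buf)
--     return fields[pos] if 0 <= pos < len(fields) else ""
-- ===== Notes on version B (the rewrite author's own statement) =====
-- stated objective: faster
-- what changed: B makes one pass with a for-loop over txt[1:] building the full field list with a current buffer and then selects fields[pos] with a range check, instead of A's two index-driven while loops (per-character indexing and condition re-checks); the single direct character iteration is a constant-factor speedup.
import Mathlib
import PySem

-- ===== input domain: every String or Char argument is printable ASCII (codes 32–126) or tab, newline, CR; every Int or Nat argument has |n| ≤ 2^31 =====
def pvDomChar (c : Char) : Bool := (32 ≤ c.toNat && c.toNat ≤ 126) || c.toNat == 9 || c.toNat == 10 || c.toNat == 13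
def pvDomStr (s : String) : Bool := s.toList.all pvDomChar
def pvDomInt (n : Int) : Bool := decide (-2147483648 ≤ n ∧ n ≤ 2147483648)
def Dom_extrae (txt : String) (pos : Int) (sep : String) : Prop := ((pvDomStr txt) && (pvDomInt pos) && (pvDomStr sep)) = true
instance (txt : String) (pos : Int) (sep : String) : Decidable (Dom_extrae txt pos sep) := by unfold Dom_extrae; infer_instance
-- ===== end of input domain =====

-- B builds the whole field list in one pass and indexes it; A skips separators then collects. Same value everywhere (both total).

-- ===== PORT A =====
-- first while loop: advance over the suffix of txt starting at i=1 until cont = pos (or end)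
def extraeSkip (cs : List Char) (cont pos : Int) (sep : String) : List Char :=
  match cs with
  | [] => []
  | c :: rest =>
      if cont = pos then c :: rest
      else extraeSkip rest (if String.mk [c] = sep then cont + 1 else cont) pos sep

-- second while loop: collect chars into res until a char equal to sep (or end)
def extraeCollect (cs : List Char) (sep : String) (res : List Char) : List Char :=
  match cs with
  | [] => res
  | c :: rest => if String.mk [c] = sep then res else extraeCollect rest sep (res ++ [c])

def extrae (txt : String) (pos : Int) (sep : String) : String :=
  String.mk (extraeCollect (extraeSkip (txt.toList.drop 1) 0 pos sep) sep [])

-- ===== PORT B =====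
-- one pass over txt[1:]: completed fields plus current buffer (fields kept as char lists)
def extraeFields (cs : List Char) (sep : String) (fields : List (List Char)) (buf : List Char) :
    List (List Char) :=
  match cs with
  | [] => fields ++ [buf]
  | c :: rest =>
      if String.mk [c] = sep then extraeFields rest sep (fields ++ [buf]) []
      else extraeFields rest sep fields (buf ++ [c])

def extrae_alt (txt : String) (pos : Int) (sep : String) : String :=
  let fields := extraeFields (txt.toList.drop 1) sep [] []
  if 0 ≤ pos ∧ pos < (fields.length : Int) then String.mk (fields.getD pos.toNat []) else ""

-- ===== PRECONDITION & SPEC =====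
def Spec_extrae (txt : String) (pos : Int) (sep : String) (out : String) : Prop := out = extrae_alt txt pos sep
instance (txt : String) (pos : Int) (sep : String) (out : String) : Decidable (Spec_extrae txt pos sep out) := by unfold Spec_extrae; infer_instance

-- ===== CLAIM (what is proved, stated in full; the proofs are below) =====
def Claim_equal_extrae : Prop := ∀ (txt : String) (pos : Int) (sep : String), Dom_extrae txt pos sep → Spec_extrae txt pos sep (extrae txt pos sep)

-- ===== LEMMAS AND PROOFS =====

theorem extraeFields_acc (cs : List Char) (sep : String) (fields : List (List Char)) (buf : List Char) :
    extraeFields cs sep fields buf = fields ++ extraeFields cs sep [] buf := by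
  induction cs generalizing fields buf with
  | nil => simp [extraeFields]
  | cons c rest ih =>
      simp only [extraeFields, List.nil_append]
      split
      · rw [ih (fields ++ [buf]), ih [buf]]; simp
      · exact ih fields (buf ++ [c])

theorem extraeFields_buf (cs : List Char) (sep : String) (buf : List Char) :
    extraeFields cs sep [] buf =
      (buf ++ (extraeFields cs sep [] []).headD []) :: (extraeFields cs sep [] []).tail := by
  induction cs generalizing buf with
  | nil => simp [extraeFields]
  | cons c rest ih =>
      simp only [extraeFields, List.nil_append]
      split
      · rw [extraeFields_acc rest sep [buf], extraeFields_acc rest sep [[]]]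
        simp
      · rw [ih (buf ++ [c]), ih [c]]
        simp

theorem extraeCollect_acc (cs : List Char) (sep : String) (res : List Char) :
    extraeCollect cs sep res = res ++ extraeCollect cs sep [] := by
  induction cs generalizing res with
  | nil => simp [extraeCollect]
  | cons c rest ih =>
      simp only [extraeCollect, List.nil_append]
      split
      · simp
      · rw [ih (res ++ [c]), ih [c]]; simp

theorem extraeCollect_head (cs : List Char) (sep : String) :
    extraeCollect cs sep [] = (extraeFields cs sep [] []).headD [] := by
  induction cs with
  | nil => simp [extraeCollect, extraeFields]
  | cons c rest ih =>
      simp only [extraeCollect, extraeFields, List.nil_append]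
      split
      · rw [extraeFields_acc rest sep [[]]]; simp
      · rw [extraeCollect_acc rest sep [c], ih, extraeFields_buf rest sep [c]]
        simp

theorem extrae_main (cs : List Char) (cont pos : Int) (sep : String) :
    extraeCollect (extraeSkip cs cont pos sep) sep [] =
      (if 0 ≤ pos - cont ∧ pos - cont < ((extraeFields cs sep [] []).length : Int)
       then (extraeFields cs sep [] []).getD (pos - cont).toNat [] else []) := by
  induction cs generalizing cont with
  | nil =>
      simp only [extraeSkip, extraeCollect, extraeFields]
      split
      · rename_i h
        have : pos - cont = 0 := by
          rcases h with ⟨h1, h2⟩; simp at h2; omega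
        simp [this]
      · rfl
  | cons c rest ih =>
      simp only [extraeSkip]
      
      by_cases hc : cont = pos
      · subst hc
        rw [if_pos rfl, extraeCollect_head (c :: rest) sep]
        have hne : extraeFields (c :: rest) sep [] [] =
            ((extraeFields (c :: rest) sep [] []).headD []) :: (extraeFields (c :: rest) sep [] []).tail := by
          simpa using extraeFields_buf (c :: rest) sep []
        rw [if_pos]
        · rw [hne]; simp
        · constructor
          · omega
          · rw [hne]; simp
      · rw [if_neg (by omega)]
        split
        · rename_i hsep
          rw [ih (cont + 1)]
          simp only [extraeFields, List.nil_append, if_pos hsep]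
          rw [extraeFields_acc rest sep [[]], List.singleton_append]
          generalize extraeFields rest sep [] [] = F
          by_cases hlt : 0 ≤ pos - (cont + 1) ∧ pos - (cont + 1) < (F.length : Int)
          · rw [if_pos hlt, if_pos (by simp only [List.length_cons]; push_cast; omega)]
            have ht : (pos - cont).toNat = (pos - (cont + 1)).toNat + 1 := by omega
            rw [ht, List.getD_cons_succ]
          · rw [if_neg hlt, if_neg (by simp only [List.length_cons]; push_cast; omega)]
        · rename_i hsep
          rw [ih cont]
          simp only [extraeFields, List.nil_append, if_neg hsep]
          rw [extraeFields_buf rest sep [c]]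
          have hlen : ((([c] ++ (extraeFields rest sep [] []).headD []) :: (extraeFields rest sep [] []).tail).length : Int)
              = ((extraeFields rest sep [] []).length : Int) := by
            have hne : extraeFields rest sep [] [] =
                ((extraeFields rest sep [] []).headD []) :: (extraeFields rest sep [] []).tail := by
              simpa using extraeFields_buf rest sep []
            conv_rhs => rw [hne]
            simp
          rw [hlen]
          split
          · rename_i h
            have hi0 : pos - cont ≠ 0 := by omega
            have ht : (pos - cont).toNat = ((pos - cont).toNat - 1) + 1 := by omega
            have hne : extraeFields rest sep [] [] =
                ((extraeFields rest sep [] []).headD []) :: (extraeFields rest sep [] []).tail := by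
              simpa using extraeFields_buf rest sep []
            conv_rhs => rw [hne]
            rw [ht]
            simp
          · rfl

-- ===== VERDICT (by name: the statement is the Claim_ definition above) =====
theorem extrae_spec : Claim_equal_extrae := by
  intro txt pos sep _
  unfold Spec_extrae extrae extrae_alt
  rw [extrae_main (txt.toList.drop 1) 0 pos sep]
  simp only [sub_zero]
  split
  · rfl
  · rfl
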